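-- pv_equiv track=rewrite | github.com/Sonali553/Count_Prime | anyBase_To_Decimal.py | anyBase_ToDecimal
-- ===== SOURCE A (Python) =====
-- def anyBase_ToDecimal(num, b):
--         res = 0
--         i = 0
--         while num > 0:
--              r = num % 10
--              res += ( r * (b ** (i)))
--              i += 1
--              num = num // 10
--
--         return res
-- ===== SOURCE B (Python) =====
-- def anyBase_ToDecimal(num, b):
--     digits = []
--     while num > 0:
--         digits.append(num % 10)
--         num //= 10
--     res = 0
--     for d in reversed(digits):
--         res = res * b + d
--     return res
-- ===== Notes on version B (the rewrite author's own statement) =====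
-- stated objective: alternative
-- what changed: B first collects the base-10 digits, then evaluates the result by Horner's method (res = res*b + d over digits most-significant-first), eliminating A's per-digit exponentiation b**i.
import Mathlib
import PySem

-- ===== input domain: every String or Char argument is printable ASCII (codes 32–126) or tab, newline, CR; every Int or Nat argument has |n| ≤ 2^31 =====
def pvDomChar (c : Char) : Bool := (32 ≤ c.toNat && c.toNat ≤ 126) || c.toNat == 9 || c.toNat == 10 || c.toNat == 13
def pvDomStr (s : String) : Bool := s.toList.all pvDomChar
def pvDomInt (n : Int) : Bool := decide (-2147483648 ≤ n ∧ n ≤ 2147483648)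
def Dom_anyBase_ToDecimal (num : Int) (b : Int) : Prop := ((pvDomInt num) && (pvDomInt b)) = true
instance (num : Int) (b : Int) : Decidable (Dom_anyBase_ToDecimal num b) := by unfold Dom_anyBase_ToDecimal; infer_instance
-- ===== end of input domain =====

-- B replaces A's per-digit exponentiation b**i with a Horner evaluation over the collected digits (alternative algorithm, same results).

-- ===== PORT A =====
-- A's while-loop over state (num, res, i): res += (num % 10) * b^i; i += 1; num //= 10
def pvLoopA (b : Int) (num : Int) (res : Int) (i : Nat) : Int :=
  if h : 0 < num then
    pvLoopA b (PySem.Int.floordiv num 10) (res + (PySem.Int.mod num 10) * b ^ i) (i + 1)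
  else
    res
termination_by num.toNat
decreasing_by
  have h10 : PySem.Int.floordiv num 10 = num / 10 := PySem.Int.floordiv_eq_ediv_of_pos (by omega)
  rw [h10]; omega

def anyBase_ToDecimal (num : Int) (b : Int) : Int := pvLoopA b num 0 0

-- ===== PORT B =====
-- digit-extraction loop: digits.append(num % 10); num //= 10
def pvDigits (num : Int) : List Int :=
  if h : 0 < num then
    PySem.Int.mod num 10 :: pvDigits (PySem.Int.floordiv num 10)
  else
    []
termination_by num.toNat
decreasing_by
  have h10 : PySem.Int.floordiv num 10 = num / 10 := PySem.Int.floordiv_eq_ediv_of_pos (by omega)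
  rw [h10]; omega

-- Horner pass: for d in reversed(digits): res = res*b + d
def anyBase_ToDecimal_alt (num : Int) (b : Int) : Int :=
  (pvDigits num).reverse.foldl (fun res d => res * b + d) 0

-- ===== PRECONDITION & SPEC =====
def Spec_anyBase_ToDecimal (num : Int) (b : Int) (out : Int) : Prop := out = anyBase_ToDecimal_alt num b
instance (num : Int) (b : Int) (out : Int) : Decidable (Spec_anyBase_ToDecimal num b out) := by unfold Spec_anyBase_ToDecimal; infer_instance

-- ===== CLAIM (what is proved, stated in full; the proofs are below) =====
def Claim_equal_anyBase_ToDecimal : Prop := ∀ (num : Int) (b : Int), Dom_anyBase_ToDecimal num b → Spec_anyBase_ToDecimal num b (anyBase_ToDecimal num b)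

-- ===== LEMMAS AND PROOFS =====

-- Horner over reversed digit list, expressed structurally on the list
def pvHorner (b : Int) : List Int → Int
  | [] => 0
  | d :: rest => pvHorner b rest * b + d

theorem pvHorner_eq_foldl (b : Int) (l : List Int) :
    l.reverse.foldl (fun res d => res * b + d) 0 = pvHorner b l := by
  induction l with
  | nil => simp [pvHorner]
  | cons d rest ih =>
    simp [pvHorner, ← ih, List.foldl_append]

theorem pvLoopA_eq (b num res : Int) (i : Nat) :
    pvLoopA b num res i = res + pvHorner b (pvDigits num) * b ^ i := by
  by_cases h : 0 < num
  · rw [pvLoopA, pvDigits, dif_pos h, dif_pos h,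
      pvLoopA_eq b (PySem.Int.floordiv num 10)]
    simp [pvHorner]; ring
  · rw [pvLoopA, pvDigits, dif_neg h, dif_neg h]
    simp [pvHorner]
termination_by num.toNat
decreasing_by
  have h10 : PySem.Int.floordiv num 10 = num / 10 := PySem.Int.floordiv_eq_ediv_of_pos (by omega)
  rw [h10]; omega

-- ===== VERDICT (by name: the statement is the Claim_ definition above) =====
theorem anyBase_ToDecimal_spec : Claim_equal_anyBase_ToDecimal := by
  intro num b _
  unfold Spec_anyBase_ToDecimal anyBase_ToDecimal anyBase_ToDecimal_alt
  rw [pvLoopA_eq, pvHorner_eq_foldl]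
  ring
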